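-- pv_equiv track=rewrite | github.com/pradionova/python67 | chapter 1/sfgsfg.py | culcH
-- ===== SOURCE A (Python) =====
-- def culcH(h, n, m):
--     top = 0
--     bottom = 0
--     for r in range(1, n + 1):
--         for c in range(1, m + 1):
--             p = (r - 1) * m + c
--             if h <= r:
--                 bottom += p
--             else:
--                 top += p
--
--     return abs(top - bottom)
-- ===== SOURCE B (Python) =====
-- def culcH(h, n, m):
--     # Closed form: total cell-index sum plus arithmetic-series sum of the
--     # "bottom" rows (rows r with h <= r), no loops.
--     if n <= 0 or m <= 0:
--         return 0
--     N = n * m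
--     total = N * (N + 1) // 2
--     s = h if h > 1 else 1          # first bottom row, clipped to 1
--     if s > n:
--         bottom = 0
--     else:
--         k = n - s + 1              # number of bottom rows
--         bottom = m * m * (k * (s + n - 2) // 2) + k * (m * (m + 1) // 2)
--     return abs(total - 2 * bottom)
-- ===== Notes on version B (the rewrite author's own statement) =====
-- stated objective: faster
-- what changed: Replaces the nested loops over all n*m cells by closed-form arithmetic-series formulas: total index sum and the bottom-rows sum are computed in O(1).
import Mathlib
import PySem

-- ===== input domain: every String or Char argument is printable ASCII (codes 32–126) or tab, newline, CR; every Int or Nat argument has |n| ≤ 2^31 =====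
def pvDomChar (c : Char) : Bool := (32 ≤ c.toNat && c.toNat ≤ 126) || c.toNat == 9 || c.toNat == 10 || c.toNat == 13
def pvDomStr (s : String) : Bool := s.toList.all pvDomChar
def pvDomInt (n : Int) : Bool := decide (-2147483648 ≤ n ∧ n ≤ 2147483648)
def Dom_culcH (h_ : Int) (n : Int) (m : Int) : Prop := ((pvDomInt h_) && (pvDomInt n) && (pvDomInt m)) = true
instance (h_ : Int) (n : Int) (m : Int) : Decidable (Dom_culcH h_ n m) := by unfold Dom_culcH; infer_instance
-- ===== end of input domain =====

-- B replaces A's nested loops over all n*m cells by closed-form arithmetic-series formulas (objective: faster).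

-- ===== PORT A =====
-- literal transliteration of A's nested loops over rows and columns
def culcH (h_ : Int) (n : Int) (m : Int) : Int :=
  let st := (PySem.List.pyRange 1 (n + 1) 1).foldl (fun (tb : Int × Int) r =>
    (PySem.List.pyRange 1 (m + 1) 1).foldl (fun (tb : Int × Int) c =>
      let p := (r - 1) * m + c
      if h_ ≤ r then (tb.1, tb.2 + p) else (tb.1 + p, tb.2)) tb) (0, 0)
  |st.1 - st.2|

-- ===== PORT B =====
-- literal transliteration of Source B (closed form)
def culcH_alt (h_ : Int) (n : Int) (m : Int) : Int :=
  if n ≤ 0 ∨ m ≤ 0 then 0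
  else
    let N := n * m
    let total := PySem.Int.floordiv (N * (N + 1)) 2
    let s := if h_ > 1 then h_ else 1
    let bottom :=
      if s > n then 0
      else
        let k := n - s + 1
        m * m * PySem.Int.floordiv (k * (s + n - 2)) 2 + k * PySem.Int.floordiv (m * (m + 1)) 2
    |total - 2 * bottom|

-- ===== PRECONDITION & SPEC =====
def Spec_culcH (h_ : Int) (n : Int) (m : Int) (out : Int) : Prop := out = culcH_alt h_ n m
instance (h_ : Int) (n : Int) (m : Int) (out : Int) : Decidable (Spec_culcH h_ n m out) := by unfold Spec_culcH; infer_instance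

-- ===== CLAIM (what is proved, stated in full; the proofs are below) =====
def Claim_equal_culcH : Prop := ∀ (h_ : Int) (n : Int) (m : Int), Dom_culcH h_ n m → Spec_culcH h_ n m (culcH h_ n m)

-- ===== LEMMAS AND PROOFS =====

-- the index sum of row r (value of A's inner loop contribution)
def pvG (m r : Int) : Int := ((PySem.List.pyRange 1 (m + 1) 1).map (fun c => (r - 1) * m + c)).sum

theorem pvFoldSnd (f : Int → Int) (l : List Int) (x y : Int) :
    l.foldl (fun (tb : Int × Int) c => (tb.1, tb.2 + f c)) (x, y) = (x, y + (l.map f).sum) := by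
  induction l generalizing y with
  | nil => simp
  | cons a t ih => simp [ih, add_assoc]

theorem pvFoldFst (f : Int → Int) (l : List Int) (x y : Int) :
    l.foldl (fun (tb : Int × Int) c => (tb.1 + f c, tb.2)) (x, y) = (x + (l.map f).sum, y) := by
  induction l generalizing x with
  | nil => simp
  | cons a t ih => simp [ih, add_assoc]

-- outer loop: fold of a per-row conditional add is the pair of the two ite-sums
theorem pvOuterFold (P : Int → Prop) [DecidablePred P] (g : Int → Int) (l : List Int) (x y : Int) :
    l.foldl (fun (tb : Int × Int) r => if P r then (tb.1, tb.2 + g r) else (tb.1 + g r, tb.2)) (x, y)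
      = (x + (l.map (fun r => if P r then 0 else g r)).sum,
         y + (l.map (fun r => if P r then g r else 0)).sum) := by
  induction l generalizing x y with
  | nil => simp
  | cons a t ih => by_cases hP : P a <;> simp [hP, ih, add_assoc]

-- A's result as two ite-sums over the row range
theorem pvA_eq (h_ n m : Int) :
    culcH h_ n m =
      |((PySem.List.pyRange 1 (n + 1) 1).map (fun r => if h_ ≤ r then 0 else pvG m r)).sum
        - ((PySem.List.pyRange 1 (n + 1) 1).map (fun r => if h_ ≤ r then pvG m r else 0)).sum| := by
  unfold culcH
  have hstep : (fun (tb : Int × Int) (r : Int) =>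
      (PySem.List.pyRange 1 (m + 1) 1).foldl (fun (tb : Int × Int) c =>
        let p := (r - 1) * m + c
        if h_ ≤ r then (tb.1, tb.2 + p) else (tb.1 + p, tb.2)) tb)
      = fun (tb : Int × Int) r =>
          if h_ ≤ r then (tb.1, tb.2 + pvG m r) else (tb.1 + pvG m r, tb.2) := by
    funext tb r
    by_cases hr : h_ ≤ r
    · simp only [hr, if_true]
      rw [show ((tb : Int × Int)) = (tb.1, tb.2) from rfl, pvFoldSnd]
      rfl
    · simp only [hr, if_false]
      rw [show ((tb : Int × Int)) = (tb.1, tb.2) from rfl, pvFoldFst]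
      rfl
  rw [hstep, pvOuterFold (fun r => h_ ≤ r) (pvG m)]
  simp

-- Gauss: doubled sum of an affine map over List.range
theorem pvGauss (j : Nat) (p q : Int) :
    2 * ((List.range j).map (fun k : Nat => p + q * (k : Int))).sum
      = (j : Int) * (2 * p + q * ((j : Int) - 1)) := by
  induction j with
  | zero => simp
  | succ i ih =>
    rw [List.range_succ]
    simp only [List.map_append, List.sum_append, List.map_cons, List.map_nil, List.sum_cons,
      List.sum_nil, Nat.cast_succ]
    rw [mul_add, ih]; ring

-- doubled sum of an affine map over an integer range
theorem pvAffine (a b p q : Int) (hab : a ≤ b) :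
    2 * ((PySem.List.pyRange a b 1).map (fun r => q * r + p)).sum
      = (b - a) * (2 * (q * a + p) + q * ((b - a) - 1)) := by
  rw [PySem.List.pyRange_one, List.map_map]
  have hL : ((fun r => q * r + p) ∘ fun k : Nat => a + (k : Int))
      = fun k : Nat => (q * a + p) + q * (k : Int) := by funext k; simp; ring
  rw [hL, pvGauss]
  have : (((b - a).toNat : Int)) = b - a := by omega
  rw [this]

-- closed form of the row sum, doubled (m ≥ 1)
theorem pvG_closed (m r : Int) (hm : 1 ≤ m) :
    2 * pvG m r = 2 * (m * m) * r + (m * (m + 1) - 2 * (m * m)) := by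
  unfold pvG
  have hL : (fun c : Int => (r - 1) * m + c) = fun c : Int => 1 * c + (r - 1) * m := by
    funext c; ring
  rw [hL, pvAffine 1 (m + 1) ((r - 1) * m) 1 (by omega)]
  ring

theorem pvSumCongr (f g : Int → Int) (l : List Int) (h : ∀ r ∈ l, f r = g r) :
    (l.map f).sum = (l.map g).sum := by rw [List.map_congr_left h]

-- quadrupled sum of row sums over a row interval (m ≥ 1)
theorem pvSumG (a b m : Int) (hm : 1 ≤ m) (hab : a ≤ b) :
    4 * ((PySem.List.pyRange a b 1).map (fun r => pvG m r)).sum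
      = (b - a) * (2 * (2 * (m * m) * a + (m * (m + 1) - 2 * (m * m)))
          + 2 * (m * m) * ((b - a) - 1)) := by
  have h1 : (2 : Int) * ((PySem.List.pyRange a b 1).map (fun r => pvG m r)).sum
      = ((PySem.List.pyRange a b 1).map (fun r => 2 * (m * m) * r + (m * (m + 1) - 2 * (m * m)))).sum := by
    rw [← List.sum_map_mul_left]
    exact pvSumCongr _ _ _ (fun r _ => by rw [← pvG_closed m r hm])
  have h2 := pvAffine a b (m * (m + 1) - 2 * (m * m)) (2 * (m * m)) hab
  calc 4 * ((PySem.List.pyRange a b 1).map (fun r => pvG m r)).sum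
      = 2 * (2 * ((PySem.List.pyRange a b 1).map (fun r => pvG m r)).sum) := by ring
    _ = _ := by rw [h1, h2]



theorem pvFdivEven (x t : Int) (h : x = 2 * t) : PySem.Int.floordiv x 2 = t := by
  rw [PySem.Int.floordiv_eq_ediv_of_pos (by norm_num), h]
  exact Int.mul_ediv_cancel_left t (by norm_num)

-- ===== VERDICT (by name: the statement is the Claim_ definition above) =====
theorem culcH_spec : Claim_equal_culcH := by
  intro h_ n m _
  show culcH h_ n m = culcH_alt h_ n m
  by_cases hn : n ≤ 0
  · simp [culcH, culcH_alt, hn, PySem.List.pyRange_one_eq_nil (show n + 1 ≤ 1 by omega)]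
  by_cases hm : m ≤ 0
  · have hg : ∀ r : Int, pvG m r = 0 := by
      intro r; unfold pvG
      simp [PySem.List.pyRange_one_eq_nil (show m + 1 ≤ 1 by omega)]
    rw [pvA_eq]
    simp [hg, culcH_alt, hm]
  -- main case: 1 ≤ n, 1 ≤ m
  have hn1 : 1 ≤ n := by omega
  have hm1 : 1 ≤ m := by omega
  rw [pvA_eq]
  have hsdef : (if h_ > 1 then h_ else 1) = max h_ 1 := by split <;> omega
  set s : Int := max h_ 1 with hs
  have hNot : ¬ (n ≤ 0 ∨ m ≤ 0) := by omega
  have hd2 : PySem.Int.floordiv (m * (m + 1)) 2 = m * (m + 1) / 2 := by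
    rcases Int.even_mul_succ_self m with ⟨u, hu⟩
    rw [pvFdivEven _ u (by omega)]; omega
  by_cases hbig : n < h_
  · -- all rows are "top": second sum vanishes
    have hS2 : ((PySem.List.pyRange 1 (n + 1) 1).map (fun r => if h_ ≤ r then pvG m r else 0)).sum = 0 := by
      apply List.sum_eq_zero
      intro x hx
      simp only [List.mem_map] at hx
      obtain ⟨r, hr, hrx⟩ := hx
      rw [PySem.List.mem_pyRange_one] at hr
      rw [if_neg (by omega)] at hrx
      omega
    have hS1 : ((PySem.List.pyRange 1 (n + 1) 1).map (fun r => if h_ ≤ r then 0 else pvG m r)).sum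
        = ((PySem.List.pyRange 1 (n + 1) 1).map (fun r => pvG m r)).sum := by
      apply pvSumCongr
      intro r hr
      rw [PySem.List.mem_pyRange_one] at hr
      rw [if_neg (by omega)]
    rw [hS1, hS2]
    have hT := pvSumG 1 (n + 1) m hm1 (by omega)
    unfold culcH_alt
    rw [if_neg hNot]
    simp only [hsdef]
    rw [if_pos (by omega : s > n)]
    have htot2 : n * m * (n * m + 1)
        = 2 * ((PySem.List.pyRange 1 (n + 1) 1).map (fun r => pvG m r)).sum := by
      apply mul_left_cancel₀ (show (2 : Int) ≠ 0 by norm_num)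
      linear_combination -hT
    rw [pvFdivEven _ _ htot2]
    norm_num
  · -- h_ ≤ n: split the rows at s
    have hsn : s ≤ n := by omega
    have hsplit := PySem.List.pyRange_one_append 1 s (n + 1) (by omega) (by omega)
    rw [hsplit]
    simp only [List.map_append, List.sum_append]
    have hTopA : ((PySem.List.pyRange 1 s 1).map (fun r => if h_ ≤ r then 0 else pvG m r)).sum
        = ((PySem.List.pyRange 1 s 1).map (fun r => pvG m r)).sum := by
      apply pvSumCongr
      intro r hr; rw [PySem.List.mem_pyRange_one] at hr; rw [if_neg (by omega)]
    have hTopB : ((PySem.List.pyRange 1 s 1).map (fun r => if h_ ≤ r then pvG m r else 0)).sum = 0 := by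
      apply List.sum_eq_zero
      intro x hx
      simp only [List.mem_map] at hx
      obtain ⟨r, hr, hrx⟩ := hx
      rw [PySem.List.mem_pyRange_one] at hr
      rw [if_neg (by omega)] at hrx; omega
    have hBotA : ((PySem.List.pyRange s (n + 1) 1).map (fun r => if h_ ≤ r then 0 else pvG m r)).sum = 0 := by
      apply List.sum_eq_zero
      intro x hx
      simp only [List.mem_map] at hx
      obtain ⟨r, hr, hrx⟩ := hx
      rw [PySem.List.mem_pyRange_one] at hr
      rw [if_pos (by omega)] at hrx; omega
    have hBotB : ((PySem.List.pyRange s (n + 1) 1).map (fun r => if h_ ≤ r then pvG m r else 0)).sum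
        = ((PySem.List.pyRange s (n + 1) 1).map (fun r => pvG m r)).sum := by
      apply pvSumCongr
      intro r hr; rw [PySem.List.mem_pyRange_one] at hr; rw [if_pos (by omega)]
    rw [hTopA, hTopB, hBotA, hBotB]
    set Ta : Int := ((PySem.List.pyRange 1 s 1).map (fun r => pvG m r)).sum with hTa'
    set Tb : Int := ((PySem.List.pyRange s (n + 1) 1).map (fun r => pvG m r)).sum with hTb'
    have hTa := pvSumG 1 s m hm1 (by omega)
    have hTb := pvSumG s (n + 1) m hm1 (by omega)
    rw [← hTa'] at hTa
    rw [← hTb'] at hTb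
    unfold culcH_alt
    rw [if_neg hNot]
    simp only [hsdef]
    rw [if_neg (by omega : ¬ s > n)]
    -- exact values of the two floor divisions and the total
    have hd1 : ∃ t : Int, (n - s + 1) * (s + n - 2) = 2 * t := by
      rcases Int.even_or_odd (n - s) with ⟨u, hu⟩ | ⟨u, hu⟩
      · exact ⟨(n - s + 1) * (u + s - 1), by nlinarith⟩
      · exact ⟨(u + 1) * (s + n - 2), by nlinarith⟩
    obtain ⟨d1, hd1⟩ := hd1
    rcases Int.even_mul_succ_self m with ⟨u2, hu2⟩
    have htotE : ∃ t : Int, n * m * (n * m + 1) = 2 * t := by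
      rcases Int.even_mul_succ_self (n * m) with ⟨v, hv⟩
      exact ⟨v, by omega⟩
    obtain ⟨tt, htt⟩ := htotE
    rw [pvFdivEven ((n - s + 1) * (s + n - 2)) d1 hd1,
        pvFdivEven (m * (m + 1)) u2 (by omega),
        pvFdivEven (n * m * (n * m + 1)) tt htt]
    have key : Ta + 0 - (0 + Tb) = tt - 2 * (m * m * d1 + (n - s + 1) * u2) := by
      apply mul_left_cancel₀ (show (4 : Int) ≠ 0 by norm_num)
      linear_combination hTa - hTb + 2 * htt - 4 * (m * m) * hd1 - 4 * (n - s + 1) * hu2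
    rw [key]
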